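-- pv_equiv track=rewrite | github.com/hmolhem/MIMO_GEOMETRY_ANALYSIS | geometry_processors/z6_processor.py | _build_geometry
-- ===== SOURCE A (Python) =====
-- from typing import Dict, Any, List, Tuple, Optional
--
-- def _build_geometry(N: int) -> List[int]:
--     """
--     Produce an integer-grid geometry with w(1)=w(2)=0 by forbidding 1- and 2-sized gaps.
--     Heuristic gap cycle is tunable; it tries to keep a decent L while expanding aperture.
--     """
--     gap_cycle = [4, 3, 3, 4, 4, 3, 4, 3]  # never 1 or 2
--     pos = [0]
--     gi = 0
--     while len(pos) < N:
--         pos.append(pos[-1] + gap_cycle[gi % len(gap_cycle)])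
--         gi += 1
--     return pos
-- ===== SOURCE B (Python) =====
-- from typing import Dict, Any, List, Tuple, Optional
--
-- _CUM = [0, 4, 7, 10, 14, 18, 21, 25]  # cumulative offsets of the gap cycle; one full cycle sums to 28
--
-- def _build_geometry(N: int) -> List[int]:
--     m = max(N, 1)
--     return [28 * (i // 8) + _CUM[i % 8] for i in range(m)]
-- ===== Notes on version B (the rewrite author's own statement) =====
-- stated objective: alternative
-- what changed: Replaces the sequential accumulator while-loop (each position = previous position + next gap) with a closed-form per-index map built from the precomputed cumulative-offset table of the gap cycle and its full-cycle sum.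
import Mathlib
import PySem

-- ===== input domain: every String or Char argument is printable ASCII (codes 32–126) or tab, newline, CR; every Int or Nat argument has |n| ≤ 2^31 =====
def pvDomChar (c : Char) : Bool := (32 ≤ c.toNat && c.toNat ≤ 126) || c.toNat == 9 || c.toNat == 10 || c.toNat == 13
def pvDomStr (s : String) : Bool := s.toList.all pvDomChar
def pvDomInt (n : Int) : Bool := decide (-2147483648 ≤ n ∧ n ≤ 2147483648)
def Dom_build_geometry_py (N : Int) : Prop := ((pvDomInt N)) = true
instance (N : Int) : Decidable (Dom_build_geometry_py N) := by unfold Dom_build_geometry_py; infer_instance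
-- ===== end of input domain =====

-- B replaces A's running-accumulator while-loop by a closed-form index map
-- pos[i] = 28*(i//8) + cum[i%8] over range(max(N,1)) (alternative decomposition, same O(N) cost).

-- ===== PORT A =====
def pvGapCycle : List Int := [4, 3, 3, 4, 4, 3, 4, 3]

-- the while-loop: pos.append(pos[-1] + gap_cycle[gi % len(gap_cycle)]); gi += 1
-- gi % len(gap_cycle) is a nonnegative in-range index, so Nat % and List.getD are exact here.
-- fuel = N.toNat only bounds the iteration count (the loop adds one element per step starting
-- from length 1, so it runs < N.toNat times); the loop's own guard len(pos) < N is unchanged.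
def pvBuildLoop (fuel : Nat) (N : Int) (pos : List Int) (gi : Nat) : List Int :=
  match fuel with
  | 0 => pos
  | fuel + 1 =>
    if (pos.length : Int) < N then
      pvBuildLoop fuel N
        (pos ++ [((PySem.List.pyGet? pos (-1)).getD 0) + pvGapCycle.getD (gi % pvGapCycle.length) 0])
        (gi + 1)
    else pos

def build_geometry_py (N : Int) : List Int := pvBuildLoop N.toNat N [0] 0

-- ===== PORT B =====
def pvCum : List Int := [0, 4, 7, 10, 14, 18, 21, 25]

-- the comprehension body 28*(i//8) + _CUM[i%8]; i ranges over range(max(N,1)) so i ≥ 0,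
-- where Python's // and % coincide with Nat division and modulus.
def pvPosAt (i : Nat) : Int := 28 * ((i / 8 : Nat) : Int) + pvCum.getD (i % 8) 0

def build_geometry_py_alt (N : Int) : List Int :=
  (List.range (max N 1).toNat).map pvPosAt

-- ===== PRECONDITION & SPEC =====
def Spec_build_geometry_py (N : Int) (out : List Int) : Prop := out = build_geometry_py_alt N
instance (N : Int) (out : List Int) : Decidable (Spec_build_geometry_py N out) := by unfold Spec_build_geometry_py; infer_instance

-- ===== CLAIM (what is proved, stated in full; the proofs are below) =====
def Claim_equal_build_geometry_py : Prop := ∀ (N : Int), Dom_build_geometry_py N → Spec_build_geometry_py N (build_geometry_py N)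

-- ===== LEMMAS AND PROOFS =====

-- closed form obeys A's recurrence: next position = current + gap of the cycle
theorem pvPosAt_succ (k : Nat) : pvPosAt (k + 1) = pvPosAt k + pvGapCycle.getD (k % 8) 0 := by
  obtain ⟨q, r, hr, rfl⟩ : ∃ q r, r < 8 ∧ k = 8 * q + r := ⟨k / 8, k % 8, by omega, by omega⟩
  have m1 : (8 * q + r) % 8 = r := by omega
  have m2 : (8 * q + r) / 8 = q := by omega
  have m3 : (8 * q + r + 1) % 8 = (r + 1) % 8 := by omega
  have m4 : (8 * q + r + 1) / 8 = q + (r + 1) / 8 := by omega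
  rw [pvPosAt, pvPosAt, m1, m2, m3, m4]
  interval_cases r <;> simp [pvCum, pvGapCycle] <;> ring

theorem pvLoop_eq (fuel : Nat) (N : Int) (k : Nat) (hk : 1 ≤ k) (hf : N.toNat ≤ k + fuel) :
    pvBuildLoop fuel N ((List.range k).map pvPosAt) (k - 1) = (List.range (max N.toNat k)).map pvPosAt := by
  induction fuel generalizing k with
  | zero =>
    have : max N.toNat k = k := by omega
    rw [pvBuildLoop, this]
  | succ fuel ih =>
    rw [pvBuildLoop]
    by_cases h : (((List.range k).map pvPosAt).length : Int) < N
    · rw [if_pos h]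
      have hk' : (List.range k).map pvPosAt = (List.range (k - 1)).map pvPosAt ++ [pvPosAt (k - 1)] := by
        conv_lhs => rw [show k = (k - 1) + 1 by omega, List.range_succ]
        simp
      have hlast : (PySem.List.pyGet? ((List.range k).map pvPosAt) (-1)).getD 0 = pvPosAt (k - 1) := by
        rw [hk', PySem.List.pyGet?_neg_one_append_singleton]; rfl
      have hnew : (List.range k).map pvPosAt ++ [(PySem.List.pyGet? ((List.range k).map pvPosAt) (-1)).getD 0
          + pvGapCycle.getD ((k - 1) % pvGapCycle.length) 0] = (List.range (k + 1)).map pvPosAt := by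
        rw [hlast, List.range_succ]
        have : pvGapCycle.length = 8 := by decide
        rw [this, ← pvPosAt_succ (k - 1), show k - 1 + 1 = k by omega]
        simp
      rw [hnew, show k - 1 + 1 = (k + 1) - 1 by omega, ih (k + 1) (by omega) (by omega)]
      have : max N.toNat (k + 1) = max N.toNat k := by simp at h; omega
      rw [this]
    · rw [if_neg h]
      have : max N.toNat k = k := by simp at h; omega
      rw [this]

-- ===== VERDICT (by name: the statement is the Claim_ definition above) =====
theorem build_geometry_py_spec : Claim_equal_build_geometry_py := by
  intro N _
  unfold Spec_build_geometry_py build_geometry_py build_geometry_py_alt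
  have h0 : ([0] : List Int) = (List.range 1).map pvPosAt := by decide
  have := pvLoop_eq N.toNat N 1 le_rfl (by omega)
  rw [h0]
  rw [show (0 : Nat) = 1 - 1 from rfl, this]
  have : (max N 1).toNat = max N.toNat 1 := by omega
  rw [this]
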